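-- pv_equiv track=rewrite | github.com/Lee-jonghwa/Algorithm | 18488_bus_trans_0902.py | bfs
-- ===== SOURCE A (Python) =====
-- from collections import deque  # deque를 사용하여 BFS를 구현하기 위해 deque 모듈을 임포트
--
-- def bfs(start_buses, end_buses, bus_graph):
--     # 시작 지점에서 출발하는 버스들을 큐에 초기화하며, 환승 횟수를 1로 설정
--     queue = deque([(bus, 1) for bus in start_buses])
--     visited = set(start_buses)  # 방문한 버스를 기록하여 중복 방문을 방지
--
--     while queue:
--         current_bus, transfers = queue.popleft()  # 큐에서 현재 버스와 환승 횟수를 꺼냄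
--
--         if current_bus in end_buses:
--             return transfers  # 목적지에 도달하는 버스를 찾으면 환승 횟수를 반환
--
--         # 현재 버스에서 환승할 수 있는 다른 버스들을 탐색
--         if current_bus in bus_graph:
--             for next_bus in bus_graph[current_bus]:
--                 if next_bus not in visited:  # 방문하지 않은 버스만 탐색
--                     visited.add(next_bus)  # 버스를 방문 처리
--                     queue.append((next_bus, transfers + 1))  # 다음 버스를 큐에 추가하고 환승 횟수를 증가
--
--     return -1  # 목적지에 도달할 수 없는 경우(이 문제에서는 발생하지 않음)
-- ===== SOURCE B (Python) =====
-- def bfs(start_buses, end_buses, bus_graph):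
--     # Level-synchronous BFS: a whole frontier per pass and one scalar transfer
--     # count, instead of a FIFO of (bus, transfers) pairs.
--     visited = set(start_buses)
--     frontier = list(start_buses)
--     transfers = 1
--     while frontier:
--         if any(bus in end_buses for bus in frontier):
--             return transfers
--         nxt = []
--         for bus in frontier:
--             for next_bus in bus_graph.get(bus, []):
--                 if next_bus not in visited:
--                     visited.add(next_bus)
--                     nxt.append(next_bus)
--         frontier = nxt
--         transfers += 1
--     return -1
-- ===== Notes on version B (the rewrite author's own statement) =====
-- stated objective: alternative
-- what changed: Replaced A's FIFO queue of (bus, transfers) pairs with a level-synchronous BFS that keeps a whole frontier list plus one scalar transfer counter, scanning the frontier for an end bus before expanding it layer by layer.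
import Mathlib
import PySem

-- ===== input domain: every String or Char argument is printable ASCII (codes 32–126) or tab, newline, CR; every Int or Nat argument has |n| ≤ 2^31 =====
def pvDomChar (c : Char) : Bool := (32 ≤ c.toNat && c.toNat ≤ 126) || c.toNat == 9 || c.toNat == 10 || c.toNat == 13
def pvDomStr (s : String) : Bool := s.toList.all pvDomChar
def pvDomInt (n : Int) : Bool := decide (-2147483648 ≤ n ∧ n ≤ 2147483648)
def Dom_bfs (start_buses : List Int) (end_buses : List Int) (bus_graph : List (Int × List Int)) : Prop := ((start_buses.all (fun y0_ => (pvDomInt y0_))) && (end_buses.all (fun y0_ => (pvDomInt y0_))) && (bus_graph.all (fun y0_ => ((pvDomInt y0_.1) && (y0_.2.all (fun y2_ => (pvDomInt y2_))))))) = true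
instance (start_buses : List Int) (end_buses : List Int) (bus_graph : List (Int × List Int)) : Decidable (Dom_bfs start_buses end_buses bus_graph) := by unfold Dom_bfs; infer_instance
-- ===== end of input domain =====

-- B changes A's FIFO of (bus, transfers) pairs into a level-synchronous BFS
-- (whole-frontier passes with one scalar transfer counter); objective: alternative decomposition.

-- ===== PORT A =====
-- all neighbour values occurring in the graph (used only as a termination measure)
def pvU (bus_graph : List (Int × List Int)) : List Int := bus_graph.flatMap Prod.snd

-- how many graph-neighbour occurrences are still unvisited (termination measure)
def pvK (bus_graph : List (Int × List Int)) (visited : PySem.Set Int) : Nat :=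
  (pvU bus_graph).countP (fun x => decide (x ∉ visited))

-- body of A's inner 'for next_bus in bus_graph[current_bus]' loop
def pvStepA (t : Int) (s : PySem.Set Int × List (Int × Int)) (nb : Int) :
    PySem.Set Int × List (Int × Int) :=
  if PySem.Set.contains s.1 nb then s else (PySem.Set.add s.1 nb, s.2 ++ [(nb, t)])

-- termination helper: a pointwise-stronger predicate with one strict witness counts strictly less
theorem pv_countP_lt (U : List Int) (p q : Int → Bool)
    (hmono : ∀ y, p y = true → q y = true) (x : Int) (hx : x ∈ U)
    (hq : q x = true) (hp : p x = false) : U.countP p < U.countP q := by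
  induction U with
  | nil => cases hx
  | cons a U ih =>
    have hle : U.countP p ≤ U.countP q := List.countP_mono_left (fun a _ h => hmono a h)
    rw [List.countP_cons, List.countP_cons]
    rcases List.mem_cons.mp hx with h' | hx'
    · subst h'
      rw [hp, hq]
      simp only [Bool.false_eq_true, if_false, if_true]
      omega
    · have hlt := ih hx'
      have h1 : (if p a = true then 1 else 0) ≤ (if q a = true then 1 else 0) := by
        by_cases h : p a = true
        · rw [h, hmono a h]
        · simp [h]
      omega

-- termination helper: what A's inner loop does to (visited, queue)
theorem pv_foldA_spec (t : Int) :
    ∀ (nbrs : List Int) (v : PySem.Set Int) (q : List (Int × Int)),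
      ∃ δ : List (Int × Int),
        (nbrs.foldl (pvStepA t) (v, q)).2 = q ++ δ ∧
        (∀ y, y ∈ v → y ∈ (nbrs.foldl (pvStepA t) (v, q)).1) ∧
        (δ = [] → (nbrs.foldl (pvStepA t) (v, q)).1 = v) ∧
        (∀ p ∈ δ, p.1 ∈ nbrs ∧ p.1 ∉ v ∧ p.1 ∈ (nbrs.foldl (pvStepA t) (v, q)).1) := by
  intro nbrs
  induction nbrs with
  | nil => intro v q; exact ⟨[], by simp⟩
  | cons nb nbrs ih =>
    intro v q
    by_cases h : nb ∈ v
    · have hst : pvStepA t (v, q) nb = (v, q) := by simp [pvStepA, h]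
      obtain ⟨δ, h1, h2, h3, h4⟩ := ih v q
      refine ⟨δ, ?_, ?_, ?_, ?_⟩ <;> simp only [List.foldl_cons, hst]
      · exact h1
      · exact h2
      · exact h3
      · exact fun p hp => ⟨List.mem_cons_of_mem _ (h4 p hp).1, (h4 p hp).2.1, (h4 p hp).2.2⟩
    · have hst : pvStepA t (v, q) nb = (PySem.Set.add v nb, q ++ [(nb, t)]) := by
        simp [pvStepA, h]
      obtain ⟨δ, h1, h2, h3, h4⟩ := ih (PySem.Set.add v nb) (q ++ [(nb, t)])
      refine ⟨(nb, t) :: δ, ?_, ?_, ?_, ?_⟩ <;> simp only [List.foldl_cons, hst]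
      · simp [h1]
      · intro y hy; exact h2 y ((PySem.Set.mem_add v nb y).mpr (Or.inl hy))
      · intro hc; cases hc
      · intro p hp
        rcases List.mem_cons.mp hp with rfl | hp'
        · exact ⟨List.mem_cons_self, h,
            h2 _ ((PySem.Set.mem_add _ _ _).mpr (Or.inr rfl))⟩
        · refine ⟨List.mem_cons_of_mem _ (h4 p hp').1, ?_, (h4 p hp').2.2⟩
          intro hv
          exact (h4 p hp').2.1 ((PySem.Set.mem_add v nb p.1).mpr (Or.inl hv))

-- termination helper: any value produced by a graph lookup occurs in pvU
theorem pv_get?_sub (bus_graph : List (Int × List Int)) (k : Int) (nbrs : List Int)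
    (h : (PySem.Dict.mk bus_graph).get? k = some nbrs) :
    ∀ x ∈ nbrs, x ∈ pvU bus_graph := by
  intro x hx
  have hitems : (k, nbrs) ∈ (PySem.Dict.mk bus_graph).items :=
    PySem.Dict.mem_items_of_get?_eq_some _ h
  exact List.mem_flatMap.mpr ⟨(k, nbrs), hitems, hx⟩

-- A's while-loop: a FIFO of (bus, transfers) pairs, dequeue one bus at a time
def pvLoopA (end_buses : List Int) (bus_graph : List (Int × List Int)) :
    List (Int × Int) → PySem.Set Int → Int
  | [], _ => -1
  | (current_bus, transfers) :: rest, visited =>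
    if end_buses.contains current_bus then transfers
    else
      match hg : (PySem.Dict.mk bus_graph).get? current_bus with
      | none => pvLoopA end_buses bus_graph rest visited
      | some nbrs =>
        let s := nbrs.foldl (pvStepA (transfers + 1)) (visited, rest)
        pvLoopA end_buses bus_graph s.2 s.1
  termination_by q visited => (pvK bus_graph visited, q.length)
  decreasing_by
  · exact Prod.Lex.right _ (by simp)
  · obtain ⟨δ, h1, h2, h3, h4⟩ := pv_foldA_spec (transfers + 1) nbrs visited rest
    cases hδ : δ with
    | nil =>
      rw [hδ] at h1 h3
      rw [h1, h3 rfl]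
      exact Prod.Lex.right _ (by simp)
    | cons p δ' =>
      have hp := h4 p (by rw [hδ]; exact List.mem_cons_self)
      have hlt : pvK bus_graph (nbrs.foldl (pvStepA (transfers + 1)) (visited, rest)).1
          < pvK bus_graph visited := by
        apply pv_countP_lt _ _ _ ?_ p.1 (pv_get?_sub bus_graph current_bus nbrs hg p.1 hp.1)
        · exact decide_eq_true hp.2.1
        · simp [hp.2.2]
        · intro y hy
          simp only [decide_eq_true_eq] at hy ⊢
          exact fun hm => hy (h2 y hm)
      exact Prod.Lex.left _ _ hlt

def bfs (start_buses : List Int) (end_buses : List Int) (bus_graph : List (Int × List Int)) : Int :=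
  pvLoopA end_buses bus_graph (start_buses.map (fun bus => (bus, (1 : Int))))
    (PySem.Set.ofList start_buses)

-- ===== PORT B =====
-- body of B's inner 'for next_bus in bus_graph.get(bus, [])' loop
def pvStepB (s : PySem.Set Int × List Int) (nb : Int) : PySem.Set Int × List Int :=
  if PySem.Set.contains s.1 nb then s else (PySem.Set.add s.1 nb, s.2 ++ [nb])

-- B's per-bus expansion: fold a bus's neighbour list into (visited, nxt)
def pvExpand (bus_graph : List (Int × List Int)) (s : PySem.Set Int × List Int) (bus : Int) :
    PySem.Set Int × List Int :=
  ((PySem.Dict.mk bus_graph).getD bus []).foldl pvStepB s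

-- termination helper: what B's inner fold does to (visited, nxt)
theorem pv_foldB_spec :
    ∀ (nbrs : List Int) (v : PySem.Set Int) (acc : List Int),
      ∃ δ : List Int,
        (nbrs.foldl pvStepB (v, acc)).2 = acc ++ δ ∧
        (∀ y, y ∈ v → y ∈ (nbrs.foldl pvStepB (v, acc)).1) ∧
        (δ = [] → (nbrs.foldl pvStepB (v, acc)).1 = v) ∧
        (∀ b ∈ δ, b ∈ nbrs ∧ b ∉ v ∧ b ∈ (nbrs.foldl pvStepB (v, acc)).1) := by
  intro nbrs
  induction nbrs with
  | nil => intro v acc; exact ⟨[], by simp⟩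
  | cons nb nbrs ih =>
    intro v acc
    by_cases h : nb ∈ v
    · have hst : pvStepB (v, acc) nb = (v, acc) := by simp [pvStepB, h]
      obtain ⟨δ, h1, h2, h3, h4⟩ := ih v acc
      refine ⟨δ, ?_, ?_, ?_, ?_⟩ <;> simp only [List.foldl_cons, hst]
      · exact h1
      · exact h2
      · exact h3
      · exact fun b hb => ⟨List.mem_cons_of_mem _ (h4 b hb).1, (h4 b hb).2.1, (h4 b hb).2.2⟩
    · have hst : pvStepB (v, acc) nb = (PySem.Set.add v nb, acc ++ [nb]) := by
        simp [pvStepB, h]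
      obtain ⟨δ, h1, h2, h3, h4⟩ := ih (PySem.Set.add v nb) (acc ++ [nb])
      refine ⟨nb :: δ, ?_, ?_, ?_, ?_⟩ <;> simp only [List.foldl_cons, hst]
      · simp [h1]
      · intro y hy; exact h2 y ((PySem.Set.mem_add v nb y).mpr (Or.inl hy))
      · intro hc; cases hc
      · intro b hb
        rcases List.mem_cons.mp hb with rfl | hb'
        · exact ⟨List.mem_cons_self, h,
            h2 _ ((PySem.Set.mem_add _ _ _).mpr (Or.inr rfl))⟩
        · refine ⟨List.mem_cons_of_mem _ (h4 b hb').1, ?_, (h4 b hb').2.2⟩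
          intro hv
          exact (h4 b hb').2.1 ((PySem.Set.mem_add v nb b).mpr (Or.inl hv))

-- termination helper: what B's whole-frontier expansion does to (visited, nxt)
theorem pv_foldExpand_spec (bus_graph : List (Int × List Int)) :
    ∀ (layer : List Int) (v : PySem.Set Int) (acc : List Int),
      ∃ δ : List Int,
        (layer.foldl (pvExpand bus_graph) (v, acc)).2 = acc ++ δ ∧
        (∀ y, y ∈ v → y ∈ (layer.foldl (pvExpand bus_graph) (v, acc)).1) ∧
        (δ = [] → (layer.foldl (pvExpand bus_graph) (v, acc)).1 = v) ∧
        (∀ b ∈ δ, b ∈ pvU bus_graph ∧ b ∉ v ∧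
          b ∈ (layer.foldl (pvExpand bus_graph) (v, acc)).1) := by
  intro layer
  induction layer with
  | nil => intro v acc; exact ⟨[], by simp⟩
  | cons bus layer ih =>
    intro v acc
    have hsub : ∀ x ∈ (PySem.Dict.mk bus_graph).getD bus [], x ∈ pvU bus_graph := by
      intro x hx
      rw [PySem.Dict.getD_eq_get?_getD] at hx
      cases hg : (PySem.Dict.mk bus_graph).get? bus with
      | none => rw [hg] at hx; cases hx
      | some nbrs => rw [hg] at hx; exact pv_get?_sub bus_graph bus nbrs hg x hx
    obtain ⟨δ₁, g1, g2, g3, g4⟩ := pv_foldB_spec ((PySem.Dict.mk bus_graph).getD bus []) v acc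
    obtain ⟨δ₂, h1, h2, h3, h4⟩ :=
      ih (((PySem.Dict.mk bus_graph).getD bus []).foldl pvStepB (v, acc)).1
         (((PySem.Dict.mk bus_graph).getD bus []).foldl pvStepB (v, acc)).2
    have hfold : (bus :: layer).foldl (pvExpand bus_graph) (v, acc) =
        layer.foldl (pvExpand bus_graph)
          ((((PySem.Dict.mk bus_graph).getD bus []).foldl pvStepB (v, acc)).1,
           (((PySem.Dict.mk bus_graph).getD bus []).foldl pvStepB (v, acc)).2) := by
      simp [pvExpand]
    refine ⟨δ₁ ++ δ₂, ?_, ?_, ?_, ?_⟩ <;> rw [hfold]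
    · rw [h1, g1, List.append_assoc]
    · exact fun y hy => h2 y (g2 y hy)
    · intro hc
      rcases List.append_eq_nil_iff.mp hc with ⟨hd1, hd2⟩
      rw [h3 hd2, g3 hd1]
    · intro b hb
      rcases List.mem_append.mp hb with hb1 | hb2
      · exact ⟨hsub b (g4 b hb1).1, (g4 b hb1).2.1, h2 b (g4 b hb1).2.2⟩
      · refine ⟨(h4 b hb2).1, ?_, (h4 b hb2).2.2⟩
        intro hv; exact (h4 b hb2).2.1 (g2 b hv)

-- B's while-loop: one pass per layer, scalar transfer counter
def pvLoopB (end_buses : List Int) (bus_graph : List (Int × List Int)) :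
    List Int → PySem.Set Int → Int → Int
  | [], _, _ => -1
  | bus :: rest, visited, transfers =>
    if (bus :: rest).any (fun b => end_buses.contains b) then transfers
    else
      let s := (bus :: rest).foldl (pvExpand bus_graph) (visited, [])
      pvLoopB end_buses bus_graph s.2 s.1 (transfers + 1)
  termination_by frontier visited _ => (pvK bus_graph visited, frontier.length)
  decreasing_by
  · obtain ⟨δ, h1, h2, h3, h4⟩ := pv_foldExpand_spec bus_graph (bus :: rest) visited []
    simp only [List.nil_append] at h1
    cases hδ : δ with
    | nil =>
      rw [hδ] at h1 h3
      rw [h1, h3 rfl]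
      exact Prod.Lex.right _ (by simp)
    | cons b δ' =>
      have hb := h4 b (by rw [hδ]; exact List.mem_cons_self)
      have hlt : pvK bus_graph ((bus :: rest).foldl (pvExpand bus_graph) (visited, [])).1
          < pvK bus_graph visited := by
        apply pv_countP_lt _ _ _ ?_ b hb.1
        · exact decide_eq_true hb.2.1
        · simpa using hb.2.2
        · intro y hy
          simp only [decide_eq_true_eq] at hy ⊢
          exact fun hm => hy (h2 y hm)
      exact Prod.Lex.left _ _ hlt

def bfs_alt (start_buses : List Int) (end_buses : List Int) (bus_graph : List (Int × List Int)) : Int :=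
  pvLoopB end_buses bus_graph start_buses (PySem.Set.ofList start_buses) 1

-- ===== PRECONDITION & SPEC =====
def Spec_bfs (start_buses : List Int) (end_buses : List Int) (bus_graph : List (Int × List Int)) (out : Int) : Prop := out = bfs_alt start_buses end_buses bus_graph
instance (start_buses : List Int) (end_buses : List Int) (bus_graph : List (Int × List Int)) (out : Int) : Decidable (Spec_bfs start_buses end_buses bus_graph out) := by unfold Spec_bfs; infer_instance

-- ===== CLAIM (what is proved, stated in full; the proofs are below) =====
def Claim_equal_bfs : Prop := ∀ (start_buses : List Int) (end_buses : List Int) (bus_graph : List (Int × List Int)), Dom_bfs start_buses end_buses bus_graph → Spec_bfs start_buses end_buses bus_graph (bfs start_buses end_buses bus_graph)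

-- ===== LEMMAS AND PROOFS =====

-- A's inner loop over a queue 'Q ++ acc.map (·, t)' acts like B's inner fold on (v, acc)
theorem pv_foldA_corr (t : Int) :
    ∀ (nbrs : List Int) (v : PySem.Set Int) (Q : List (Int × Int)) (acc : List Int),
      nbrs.foldl (pvStepA t) (v, Q ++ acc.map (fun b => (b, t))) =
        ((nbrs.foldl pvStepB (v, acc)).1,
         Q ++ ((nbrs.foldl pvStepB (v, acc)).2).map (fun b => (b, t))) := by
  intro nbrs
  induction nbrs with
  | nil => intro v Q acc; rfl
  | cons nb nbrs ih =>
    intro v Q acc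
    by_cases h : nb ∈ v
    · have hA : pvStepA t (v, Q ++ acc.map (fun b => (b, t))) nb =
          (v, Q ++ acc.map (fun b => (b, t))) := by simp [pvStepA, h]
      have hB : pvStepB (v, acc) nb = (v, acc) := by simp [pvStepB, h]
      simp only [List.foldl_cons, hA, hB]
      exact ih v Q acc
    · have hA : pvStepA t (v, Q ++ acc.map (fun b => (b, t))) nb =
          (PySem.Set.add v nb, Q ++ ((acc ++ [nb]).map (fun b => (b, t)))) := by
        simp [pvStepA, h]
      have hB : pvStepB (v, acc) nb = (PySem.Set.add v nb, acc ++ [nb]) := by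
        simp [pvStepB, h]
      simp only [List.foldl_cons, hA, hB]
      exact ih (PySem.Set.add v nb) Q (acc ++ [nb])

-- one whole layer of A's dequeue loop equals B's frontier check + expansion
theorem pv_layer (end_buses : List Int) (bus_graph : List (Int × List Int)) :
    ∀ (layer : List Int) (v : PySem.Set Int) (next : List Int) (d : Int),
      pvLoopA end_buses bus_graph
          (layer.map (fun b => (b, d)) ++ next.map (fun b => (b, d + 1))) v =
        if layer.any (fun bus => end_buses.contains bus) then d
        else pvLoopA end_buses bus_graph
          ((layer.foldl (pvExpand bus_graph) (v, next)).2.map (fun b => (b, d + 1)))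
          (layer.foldl (pvExpand bus_graph) (v, next)).1 := by
  intro layer
  induction layer with
  | nil => intro v next d; simp
  | cons bus layer ih =>
    intro v next d
    simp only [List.map_cons, List.cons_append]
    rw [pvLoopA]
    by_cases hend : bus ∈ end_buses
    · simp [hend]
    · rw [if_neg (by simpa using hend)]
      split
      next hg =>
        have hgd : (PySem.Dict.mk bus_graph).getD bus [] = [] := by
          rw [PySem.Dict.getD_eq_get?_getD, hg]; rfl
        rw [ih v next d]
        simp [pvExpand, hgd, hend]
      next nbrs hg =>
        have hgd : (PySem.Dict.mk bus_graph).getD bus [] = nbrs := by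
          rw [PySem.Dict.getD_eq_get?_getD, hg]; rfl
        have hcorr := pv_foldA_corr (d + 1) nbrs v (layer.map (fun b => (b, d))) next
        simp only [hcorr]
        rw [ih]
        simp [pvExpand, hgd, hend]

-- the two loops agree: strong induction on the unvisited-neighbour count
theorem pv_loops_agree (end_buses : List Int) (bus_graph : List (Int × List Int)) :
    ∀ (n : Nat) (v : PySem.Set Int), pvK bus_graph v = n →
      ∀ (frontier : List Int) (d : Int),
        pvLoopA end_buses bus_graph (frontier.map (fun b => (b, d))) v =
          pvLoopB end_buses bus_graph frontier v d := by
  intro n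
  induction n using Nat.strong_induction_on with
  | _ n ih =>
    intro v hn frontier d
    cases frontier with
    | nil => simp only [List.map_nil]; rw [pvLoopA, pvLoopB]
    | cons bus rest =>
      have hlay := pv_layer end_buses bus_graph (bus :: rest) v [] d
      simp only [List.map_nil, List.append_nil] at hlay
      rw [hlay, pvLoopB]
      by_cases hany : ((bus :: rest).any fun bus => end_buses.contains bus) = true
      · rw [if_pos hany, if_pos hany]
      · rw [if_neg hany, if_neg hany]
        obtain ⟨δ, h1, h2, h3, h4⟩ := pv_foldExpand_spec bus_graph (bus :: rest) v []
        simp only [List.nil_append] at h1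
        cases hδ : δ with
        | nil =>
          rw [hδ] at h1
          simp only [h1, List.map_nil]
          rw [pvLoopA, pvLoopB]
        | cons b δ' =>
          have hb := h4 b (by rw [hδ]; exact List.mem_cons_self)
          have hlt : pvK bus_graph ((bus :: rest).foldl (pvExpand bus_graph) (v, [])).1
              < pvK bus_graph v := by
            apply pv_countP_lt _ _ _ ?_ b hb.1
            · exact decide_eq_true hb.2.1
            · simpa using hb.2.2
            · intro y hy
              simp only [decide_eq_true_eq] at hy ⊢
              exact fun hm => hy (h2 y hm)
          subst hn
          exact ih _ hlt _ rfl _ _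

-- ===== VERDICT (by name: the statement is the Claim_ definition above) =====
theorem bfs_spec : Claim_equal_bfs := by
  intro start_buses end_buses bus_graph _
  unfold Spec_bfs bfs bfs_alt
  exact pv_loops_agree end_buses bus_graph _ (PySem.Set.ofList start_buses) rfl start_buses 1
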